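-- pv_equiv track=rewrite | github.com/coderman400/ffcs | main.py | is_slot_conflict
-- ===== SOURCE A (Python) =====
-- slot_timings = {
--     "A1": [("Monday", "0800-0850"), ("Wednesday", "0900-0950")],
--     "TA1": [("Friday", "1000-1050")],
--     "TAA1": [("Tuesday", "1200-1250")],
--     "B1": [("Tuesday", "0800-0850"), ("Thursday", "0900-0950")],
--     "TB1": [("Monday", "1100-1150")],
--     "C1": [("Wednesday", "0800-0850"), ("Friday", "0900-0950")],
--     "TC1": [("Tuesday", "1100-1150")],
--     "TCC1": [("Thursday", "1200-1250")],
--     "D1": [("Thursday", "0800-0850"), ("Monday", "1000-1050")],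
--     "TD1": [("Friday", "1200-1250")],
--     "E1": [("Friday", "0800-0850"), ("Tuesday", "1000-1050")],
--     "TE1": [("Thursday", "1100-1150")],
--     "F1": [("Monday", "0900-0950"), ("Wednesday", "1000-1050")],
--     "TF1": [("Friday", "1100-1150")],
--     "G1": [("Tuesday", "0900-0950"), ("Thursday", "1000-1050")],
--     "TG1": [("Monday", "1200-1250")],
--     "A2": [("Monday", "1400-1450"), ("Wednesday", "1500-1550")],
--     "F2": [("Monday", "1500-1550"), ("Wednesday", "1600-1650")],
--     "D2": [("Monday", "1600-1650"), ("Thursday", "1400-1450")],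
--     "TB2": [("Monday", "1700-1750")],
--     "TG2": [("Monday", "1800-1850")],
--     "B2": [("Tuesday", "1400-1450"), ("Thursday", "1500-1550")],
--     "G2": [("Tuesday", "1500-1550"), ("Thursday", "1600-1650")],
--     "E2": [("Tuesday", "1600-1650"), ("Friday", "1400-1450")],
--     "TC2": [("Tuesday", "1700-1750")],
--     "TAA2": [("Tuesday", "1800-1850")],
--     "C2": [("Wednesday", "1400-1450"), ("Friday", "1500-1550")],
--     "TD2": [("Wednesday", "1700-1750")],
--     "TBB2": [("Wednesday", "1800-1850")],
--     "TE2": [("Thursday", "1700-1750")],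
--     "TCC2": [("Thursday", "1800-1850")],
--     "TA2": [("Friday", "1600-1650")],
--     "TF2": [("Friday", "1700-1750")],
--     "TDD2": [("Friday", "1800-1850")],
--     "L1+L2": [("Monday", "0800-0940")],
--     "L3+L4": [("Monday", "0950-1130")],
--     "L5+L6": [("Monday", "1140-1230")],
--     "L7+L8": [("Tuesday", "0800-0940")],
--     "L9+L10": [("Tuesday", "0950-1130")],
--     "L11+L12": [("Tuesday", "1140-1230")],
--     "L13+L14": [("Wednesday", "0800-0940")],
--     "L15+L16": [("Wednesday", "0950-1130")],
--     "L17+L18": [("Wednesday", "1140-1230")],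
--     "L19+L20": [("Thursday", "0800-0940")],
--     "L21+L22": [("Thursday", "0950-1130")],
--     "L23+L24": [("Thursday", "1140-1230")],
--     "L25+L26": [("Friday", "0800-0940")],
--     "L27+L28": [("Friday", "0950-1130")],
--     "L29+L30": [("Friday", "1140-1230")],
--     "L31+L32": [("Monday", "1400-1540")],
--     "L33+L34": [("Monday", "1550-1730")],
--     "L35+L36": [("Monday", "1830-1920")],
--     "L37+L38": [("Tuesday", "1400-1540")],
--     "L39+L40": [("Tuesday", "1550-1730")],
--     "L41+L42": [("Tuesday", "1800-1920")],
--     "L43+L44": [("Wednesday", "1400-1540")],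
--     "L45+L46": [("Wednesday", "1550-1730")],
--     "L47+L48": [("Wednesday", "1740-1920")],
--     "L49+L50": [("Thursday", "1400-1540")],
--     "L51+L52": [("Thursday", "1550-1730")],
--     "L53+L54": [("Thursday", "1740-1920")],
--     "L55+L56": [("Friday", "1400-1540")],
--     "L57+L58": [("Friday", "1550-1730")],
--     "L59+L60": [("Friday", "1740-1920")],
--     "V1": [("Wednesday", "1100-1150")],
--     # Add any additional slots if necessary
-- }
--
-- def time_to_minutes(time_str):
--     """Converts time in 'HHMM' format to minutes since midnight."""
--     return int(time_str[:2]) * 60 + int(time_str[2:])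
--
-- def is_time_conflict(time_ranges1, time_ranges2):
--     """Checks if any time ranges in two lists conflict."""
--     for day1, time_range1 in time_ranges1:
--         for day2, time_range2 in time_ranges2:  # Properly unpack time_ranges2 here
--             if day1 == day2:  # Check if both slots are on the same day
--                 start1, end1 = map(time_to_minutes, time_range1.split('-'))
--                 start2, end2 = map(time_to_minutes, time_range2.split('-'))
--                 if max(start1, start2) < min(end1, end2):  # Check if the times overlap
--                     return True
--     return False
--
-- def is_slot_conflict(slots1, slots2):
--     """Checks if any slots in two lists conflict by time or name."""
--     for slot1 in slots1:
--         for slot2 in slots2: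
--             if slot1 == slot2:  # Direct slot conflict
--                 return True
--             times1 = slot_timings.get(slot1, [])
--             times2 = slot_timings.get(slot2, [])
--             if is_time_conflict(times1, times2):
--                 return True
--     return False
-- ===== SOURCE B (Python) =====
-- # Precomputed schedule: slot -> list of (day_code, start_minute, end_minute).
-- # Day codes: Monday=0 .. Friday=4; minutes since midnight, parsed once from the
-- # original timetable so no string parsing happens per query.
-- SLOT_SCHED = {
--     "A1": [(0, 480, 530), (2, 540, 590)],
--     "TA1": [(4, 600, 650)],
--     "TAA1": [(1, 720, 770)],
--     "B1": [(1, 480, 530), (3, 540, 590)],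
--     "TB1": [(0, 660, 710)],
--     "C1": [(2, 480, 530), (4, 540, 590)],
--     "TC1": [(1, 660, 710)],
--     "TCC1": [(3, 720, 770)],
--     "D1": [(3, 480, 530), (0, 600, 650)],
--     "TD1": [(4, 720, 770)],
--     "E1": [(4, 480, 530), (1, 600, 650)],
--     "TE1": [(3, 660, 710)],
--     "F1": [(0, 540, 590), (2, 600, 650)],
--     "TF1": [(4, 660, 710)],
--     "G1": [(1, 540, 590), (3, 600, 650)],
--     "TG1": [(0, 720, 770)],
--     "A2": [(0, 840, 890), (2, 900, 950)],
--     "F2": [(0, 900, 950), (2, 960, 1010)],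
--     "D2": [(0, 960, 1010), (3, 840, 890)],
--     "TB2": [(0, 1020, 1070)],
--     "TG2": [(0, 1080, 1130)],
--     "B2": [(1, 840, 890), (3, 900, 950)],
--     "G2": [(1, 900, 950), (3, 960, 1010)],
--     "E2": [(1, 960, 1010), (4, 840, 890)],
--     "TC2": [(1, 1020, 1070)],
--     "TAA2": [(1, 1080, 1130)],
--     "C2": [(2, 840, 890), (4, 900, 950)],
--     "TD2": [(2, 1020, 1070)],
--     "TBB2": [(2, 1080, 1130)],
--     "TE2": [(3, 1020, 1070)],
--     "TCC2": [(3, 1080, 1130)],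
--     "TA2": [(4, 960, 1010)],
--     "TF2": [(4, 1020, 1070)],
--     "TDD2": [(4, 1080, 1130)],
--     "L1+L2": [(0, 480, 580)],
--     "L3+L4": [(0, 590, 690)],
--     "L5+L6": [(0, 700, 750)],
--     "L7+L8": [(1, 480, 580)],
--     "L9+L10": [(1, 590, 690)],
--     "L11+L12": [(1, 700, 750)],
--     "L13+L14": [(2, 480, 580)],
--     "L15+L16": [(2, 590, 690)],
--     "L17+L18": [(2, 700, 750)],
--     "L19+L20": [(3, 480, 580)],
--     "L21+L22": [(3, 590, 690)],
--     "L23+L24": [(3, 700, 750)],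
--     "L25+L26": [(4, 480, 580)],
--     "L27+L28": [(4, 590, 690)],
--     "L29+L30": [(4, 700, 750)],
--     "L31+L32": [(0, 840, 940)],
--     "L33+L34": [(0, 950, 1050)],
--     "L35+L36": [(0, 1110, 1160)],
--     "L37+L38": [(1, 840, 940)],
--     "L39+L40": [(1, 950, 1050)],
--     "L41+L42": [(1, 1080, 1160)],
--     "L43+L44": [(2, 840, 940)],
--     "L45+L46": [(2, 950, 1050)],
--     "L47+L48": [(2, 1060, 1160)],
--     "L49+L50": [(3, 840, 940)],
--     "L51+L52": [(3, 950, 1050)],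
--     "L53+L54": [(3, 1060, 1160)],
--     "L55+L56": [(4, 840, 940)],
--     "L57+L58": [(4, 950, 1050)],
--     "L59+L60": [(4, 1060, 1160)],
--     "V1": [(2, 660, 710)],
-- }
--
-- def is_slot_conflict(slots1, slots2):
--     """Set lookup for name clashes; per-day interval index for time clashes."""
--     names2 = set(slots2)
--     if any(s in names2 for s in slots1):
--         return True
--     busy = {}
--     for s in set(slots2):
--         for d, a, b in SLOT_SCHED.get(s, ()):
--             busy.setdefault(d, []).append((a, b))
--     for s in set(slots1):
--         for d, a, b in SLOT_SCHED.get(s, ()):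
--             for a2, b2 in busy.get(d, ()):
--                 if max(a, a2) < min(b, b2):
--                     return True
--     return False
-- ===== Notes on version B (the rewrite author's own statement) =====
-- stated objective: faster
-- what changed: B precomputes the timetable into integer (day-code, start-minute, end-minute) triples and replaces A's all-pairs scan (with per-pair string splitting and int parsing) by a set-membership pass for name clashes plus a per-day interval index built once from the distinct slots of the second list.
import Mathlib
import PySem

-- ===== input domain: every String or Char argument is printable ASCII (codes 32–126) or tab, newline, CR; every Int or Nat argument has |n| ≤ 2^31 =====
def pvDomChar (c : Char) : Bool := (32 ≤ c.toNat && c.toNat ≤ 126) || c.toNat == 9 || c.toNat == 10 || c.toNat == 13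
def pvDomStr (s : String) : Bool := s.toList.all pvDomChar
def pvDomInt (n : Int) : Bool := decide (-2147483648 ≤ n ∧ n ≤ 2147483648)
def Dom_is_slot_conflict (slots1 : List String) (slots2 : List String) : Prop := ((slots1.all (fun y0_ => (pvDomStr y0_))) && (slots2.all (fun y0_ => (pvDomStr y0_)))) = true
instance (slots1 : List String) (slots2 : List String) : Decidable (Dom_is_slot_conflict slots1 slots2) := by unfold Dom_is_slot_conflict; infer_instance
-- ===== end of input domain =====

-- ===== PORT A =====
-- B checks name clashes through one set and time clashes through a per-day index over a
-- precomputed integer schedule (day codes, minutes) instead of A's all-pairs scan with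
-- per-pair string parsing; objective: faster.
def slotTimings : PySem.Dict String (List (String × String)) := PySem.Dict.ofList [
  ("A1", [("Monday", "0800-0850"), ("Wednesday", "0900-0950")]),
  ("TA1", [("Friday", "1000-1050")]),
  ("TAA1", [("Tuesday", "1200-1250")]),
  ("B1", [("Tuesday", "0800-0850"), ("Thursday", "0900-0950")]),
  ("TB1", [("Monday", "1100-1150")]),
  ("C1", [("Wednesday", "0800-0850"), ("Friday", "0900-0950")]),
  ("TC1", [("Tuesday", "1100-1150")]),
  ("TCC1", [("Thursday", "1200-1250")]),
  ("D1", [("Thursday", "0800-0850"), ("Monday", "1000-1050")]),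
  ("TD1", [("Friday", "1200-1250")]),
  ("E1", [("Friday", "0800-0850"), ("Tuesday", "1000-1050")]),
  ("TE1", [("Thursday", "1100-1150")]),
  ("F1", [("Monday", "0900-0950"), ("Wednesday", "1000-1050")]),
  ("TF1", [("Friday", "1100-1150")]),
  ("G1", [("Tuesday", "0900-0950"), ("Thursday", "1000-1050")]),
  ("TG1", [("Monday", "1200-1250")]),
  ("A2", [("Monday", "1400-1450"), ("Wednesday", "1500-1550")]),
  ("F2", [("Monday", "1500-1550"), ("Wednesday", "1600-1650")]),
  ("D2", [("Monday", "1600-1650"), ("Thursday", "1400-1450")]),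
  ("TB2", [("Monday", "1700-1750")]),
  ("TG2", [("Monday", "1800-1850")]),
  ("B2", [("Tuesday", "1400-1450"), ("Thursday", "1500-1550")]),
  ("G2", [("Tuesday", "1500-1550"), ("Thursday", "1600-1650")]),
  ("E2", [("Tuesday", "1600-1650"), ("Friday", "1400-1450")]),
  ("TC2", [("Tuesday", "1700-1750")]),
  ("TAA2", [("Tuesday", "1800-1850")]),
  ("C2", [("Wednesday", "1400-1450"), ("Friday", "1500-1550")]),
  ("TD2", [("Wednesday", "1700-1750")]),
  ("TBB2", [("Wednesday", "1800-1850")]),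
  ("TE2", [("Thursday", "1700-1750")]),
  ("TCC2", [("Thursday", "1800-1850")]),
  ("TA2", [("Friday", "1600-1650")]),
  ("TF2", [("Friday", "1700-1750")]),
  ("TDD2", [("Friday", "1800-1850")]),
  ("L1+L2", [("Monday", "0800-0940")]),
  ("L3+L4", [("Monday", "0950-1130")]),
  ("L5+L6", [("Monday", "1140-1230")]),
  ("L7+L8", [("Tuesday", "0800-0940")]),
  ("L9+L10", [("Tuesday", "0950-1130")]),
  ("L11+L12", [("Tuesday", "1140-1230")]),
  ("L13+L14", [("Wednesday", "0800-0940")]),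
  ("L15+L16", [("Wednesday", "0950-1130")]),
  ("L17+L18", [("Wednesday", "1140-1230")]),
  ("L19+L20", [("Thursday", "0800-0940")]),
  ("L21+L22", [("Thursday", "0950-1130")]),
  ("L23+L24", [("Thursday", "1140-1230")]),
  ("L25+L26", [("Friday", "0800-0940")]),
  ("L27+L28", [("Friday", "0950-1130")]),
  ("L29+L30", [("Friday", "1140-1230")]),
  ("L31+L32", [("Monday", "1400-1540")]),
  ("L33+L34", [("Monday", "1550-1730")]),
  ("L35+L36", [("Monday", "1830-1920")]),
  ("L37+L38", [("Tuesday", "1400-1540")]),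
  ("L39+L40", [("Tuesday", "1550-1730")]),
  ("L41+L42", [("Tuesday", "1800-1920")]),
  ("L43+L44", [("Wednesday", "1400-1540")]),
  ("L45+L46", [("Wednesday", "1550-1730")]),
  ("L47+L48", [("Wednesday", "1740-1920")]),
  ("L49+L50", [("Thursday", "1400-1540")]),
  ("L51+L52", [("Thursday", "1550-1730")]),
  ("L53+L54", [("Thursday", "1740-1920")]),
  ("L55+L56", [("Friday", "1400-1540")]),
  ("L57+L58", [("Friday", "1550-1730")]),
  ("L59+L60", [("Friday", "1740-1920")]),
  ("V1", [("Wednesday", "1100-1150")])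
]

-- int(t[:2]) * 60 + int(t[2:]); the ofStr? none branch (ValueError) is unreachable on the table's 'HHMM' constants
def timeToMinutes (t : String) : Int :=
  ((PySem.Int.ofStr? (PySem.Str.slice t none (some 2))).getD 0) * 60 +
  ((PySem.Int.ofStr? (PySem.Str.slice t (some 2) none)).getD 0)

-- 'start, end = map(time_to_minutes, rng.split('-'))'; the _ branch (unpack ValueError) is unreachable on the table's 'HHMM-HHMM' constants
def rangeMinutes (rng : String) : Int × Int :=
  match ((PySem.Str.split? rng "-").getD []).map timeToMinutes with
  | [a, b] => (a, b)
  | _ => (0, 0)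

def isTimeConflict (ts1 ts2 : List (String × String)) : Bool :=
  ts1.any (fun p1 => ts2.any (fun p2 =>
    p1.1 == p2.1 &&
      (max (rangeMinutes p1.2).1 (rangeMinutes p2.2).1 <
       min (rangeMinutes p1.2).2 (rangeMinutes p2.2).2)))

def is_slot_conflict (slots1 : List String) (slots2 : List String) : Bool :=
  slots1.any (fun s1 => slots2.any (fun s2 =>
    s1 == s2 || isTimeConflict (slotTimings.getD s1 []) (slotTimings.getD s2 [])))

-- ===== PORT B =====
-- SLOT_SCHED: slot -> [(day_code Monday=0..Friday=4, start_minute, end_minute)], minutes precomputed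
def slotSched : PySem.Dict String (List (Int × Int × Int)) := PySem.Dict.ofList [
  ("A1", [(0, 480, 530), (2, 540, 590)]),
  ("TA1", [(4, 600, 650)]),
  ("TAA1", [(1, 720, 770)]),
  ("B1", [(1, 480, 530), (3, 540, 590)]),
  ("TB1", [(0, 660, 710)]),
  ("C1", [(2, 480, 530), (4, 540, 590)]),
  ("TC1", [(1, 660, 710)]),
  ("TCC1", [(3, 720, 770)]),
  ("D1", [(3, 480, 530), (0, 600, 650)]),
  ("TD1", [(4, 720, 770)]),
  ("E1", [(4, 480, 530), (1, 600, 650)]),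
  ("TE1", [(3, 660, 710)]),
  ("F1", [(0, 540, 590), (2, 600, 650)]),
  ("TF1", [(4, 660, 710)]),
  ("G1", [(1, 540, 590), (3, 600, 650)]),
  ("TG1", [(0, 720, 770)]),
  ("A2", [(0, 840, 890), (2, 900, 950)]),
  ("F2", [(0, 900, 950), (2, 960, 1010)]),
  ("D2", [(0, 960, 1010), (3, 840, 890)]),
  ("TB2", [(0, 1020, 1070)]),
  ("TG2", [(0, 1080, 1130)]),
  ("B2", [(1, 840, 890), (3, 900, 950)]),
  ("G2", [(1, 900, 950), (3, 960, 1010)]),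
  ("E2", [(1, 960, 1010), (4, 840, 890)]),
  ("TC2", [(1, 1020, 1070)]),
  ("TAA2", [(1, 1080, 1130)]),
  ("C2", [(2, 840, 890), (4, 900, 950)]),
  ("TD2", [(2, 1020, 1070)]),
  ("TBB2", [(2, 1080, 1130)]),
  ("TE2", [(3, 1020, 1070)]),
  ("TCC2", [(3, 1080, 1130)]),
  ("TA2", [(4, 960, 1010)]),
  ("TF2", [(4, 1020, 1070)]),
  ("TDD2", [(4, 1080, 1130)]),
  ("L1+L2", [(0, 480, 580)]),
  ("L3+L4", [(0, 590, 690)]),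
  ("L5+L6", [(0, 700, 750)]),
  ("L7+L8", [(1, 480, 580)]),
  ("L9+L10", [(1, 590, 690)]),
  ("L11+L12", [(1, 700, 750)]),
  ("L13+L14", [(2, 480, 580)]),
  ("L15+L16", [(2, 590, 690)]),
  ("L17+L18", [(2, 700, 750)]),
  ("L19+L20", [(3, 480, 580)]),
  ("L21+L22", [(3, 590, 690)]),
  ("L23+L24", [(3, 700, 750)]),
  ("L25+L26", [(4, 480, 580)]),
  ("L27+L28", [(4, 590, 690)]),
  ("L29+L30", [(4, 700, 750)]),
  ("L31+L32", [(0, 840, 940)]),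
  ("L33+L34", [(0, 950, 1050)]),
  ("L35+L36", [(0, 1110, 1160)]),
  ("L37+L38", [(1, 840, 940)]),
  ("L39+L40", [(1, 950, 1050)]),
  ("L41+L42", [(1, 1080, 1160)]),
  ("L43+L44", [(2, 840, 940)]),
  ("L45+L46", [(2, 950, 1050)]),
  ("L47+L48", [(2, 1060, 1160)]),
  ("L49+L50", [(3, 840, 940)]),
  ("L51+L52", [(3, 950, 1050)]),
  ("L53+L54", [(3, 1060, 1160)]),
  ("L55+L56", [(4, 840, 940)]),
  ("L57+L58", [(4, 950, 1050)]),
  ("L59+L60", [(4, 1060, 1160)]),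
  ("V1", [(2, 660, 710)])
]

-- 'for s in set(slots2): for d, a, b in SLOT_SCHED.get(s, ()): busy.setdefault(d, []).append((a, b))'
def busyIndex (slots2 : List String) : PySem.Dict Int (List (Int × Int)) :=
  (PySem.Set.ofList slots2).foldl
    (fun d s => (slotSched.getD s []).foldl
      (fun d t => d.insert t.1 ((d.getD t.1 []) ++ [(t.2.1, t.2.2)])) d)
    PySem.Dict.empty

def is_slot_conflict_alt (slots1 : List String) (slots2 : List String) : Bool :=
  let names2 := PySem.Set.ofList slots2
  if slots1.any (fun s => PySem.Set.contains names2 s) then true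
  else
    let busy := busyIndex slots2
    (PySem.Set.ofList slots1).any (fun s =>
      (slotSched.getD s []).any (fun t =>
        (busy.getD t.1 []).any (fun q =>
          max t.2.1 q.1 < min t.2.2 q.2)))

-- ===== PRECONDITION & SPEC =====
def Spec_is_slot_conflict (slots1 : List String) (slots2 : List String) (out : Bool) : Prop := out = is_slot_conflict_alt slots1 slots2
instance (slots1 : List String) (slots2 : List String) (out : Bool) : Decidable (Spec_is_slot_conflict slots1 slots2 out) := by unfold Spec_is_slot_conflict; infer_instance

-- ===== CLAIM (what is proved, stated in full; the proofs are below) =====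
def Claim_equal_is_slot_conflict : Prop := ∀ (slots1 : List String) (slots2 : List String), Dom_is_slot_conflict slots1 slots2 → Spec_is_slot_conflict slots1 slots2 (is_slot_conflict slots1 slots2)

-- ===== LEMMAS AND PROOFS =====

def pvDays : List String := ["Monday", "Tuesday", "Wednesday", "Thursday", "Friday"]

def pvDayCode (d : String) : Int :=
  if d = "Monday" then 0 else if d = "Tuesday" then 1 else if d = "Wednesday" then 2
  else if d = "Thursday" then 3 else 4

def pvConv (p : String × String) : Int × Int × Int :=
  (pvDayCode p.1, (rangeMinutes p.2).1, (rangeMinutes p.2).2)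

set_option maxRecDepth 8192 in
lemma sched_eq :
    slotSched = PySem.Dict.mk (slotTimings.items.map (fun kv => (kv.1, kv.2.map pvConv))) := by
  decide

lemma get?_mk_map {n1 n2 : Type} (f : n1 -> n2) (l : List (String × n1)) (k : String) :
    (PySem.Dict.mk (l.map (fun p => (p.1, f p.2)))).get? k = ((PySem.Dict.mk l).get? k).map f := by
  induction l with
  | nil => rfl
  | cons p l ih =>
    obtain ⟨a, v⟩ := p
    simp only [List.map_cons, PySem.Dict.get?_mk_cons]
    split_ifs <;> simp [ih]

lemma sched_getD (s : String) :
    slotSched.getD s [] = (slotTimings.getD s []).map pvConv := by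
  rw [PySem.Dict.getD_eq_get?_getD, PySem.Dict.getD_eq_get?_getD, sched_eq]
  have h := get?_mk_map (List.map pvConv) slotTimings.items s
  rw [show ∀ (d : PySem.Dict String (List (String × String))), PySem.Dict.mk d.items = d from fun _ => rfl] at h
  rw [h]
  cases slotTimings.get? s <;> rfl

set_option maxRecDepth 8192 in
lemma day_mem (s : String) (p : String × String) (hp : p ∈ slotTimings.getD s []) :
    p.1 ∈ pvDays := by
  rw [PySem.Dict.getD_eq_get?_getD] at hp
  cases h : slotTimings.get? s with
  | none => rw [h] at hp; simp at hp
  | some v =>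
    rw [h] at hp
    have hm := PySem.Dict.mem_items_of_get?_eq_some (d := slotTimings) h
    have hall : ∀ kv ∈ slotTimings.items, ∀ q ∈ kv.2, q.1 ∈ pvDays := by decide
    exact hall _ hm p hp

lemma code_inj : ∀ d1 ∈ pvDays, ∀ d2 ∈ pvDays, pvDayCode d1 = pvDayCode d2 → d1 = d2 := by
  decide

lemma foldl_insert_append_mem (l : List (Int × Int × Int))
    (d : PySem.Dict Int (List (Int × Int))) (day : Int) (q : Int × Int) :
    q ∈ (l.foldl (fun d t => d.insert t.1 ((d.getD t.1 []) ++ [(t.2.1, t.2.2)])) d).getD day []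
      ↔ q ∈ d.getD day [] ∨ ∃ t ∈ l, t.1 = day ∧ q = (t.2.1, t.2.2) := by
  induction l generalizing d with
  | nil => simp
  | cons t l ih =>
    simp only [List.foldl_cons, ih, PySem.Dict.getD_insert, List.mem_cons]
    split_ifs with h
    · subst h; simp; tauto
    · constructor
      · rintro (hq | ⟨t', ht', hday, hq⟩)
        · exact Or.inl hq
        · exact Or.inr ⟨t', Or.inr ht', hday, hq⟩
      · rintro (hq | ⟨t', ht', hday, hq⟩)
        · exact Or.inl hq
        · rcases ht' with rfl | ht'
          · exact absurd hday.symm h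
          · exact Or.inr ⟨t', ht', hday, hq⟩

lemma busyIndex_mem (slots2 : List String) (day : Int) (q : Int × Int) :
    q ∈ (busyIndex slots2).getD day []
      ↔ ∃ s ∈ slots2, ∃ t ∈ slotSched.getD s [], t.1 = day ∧ q = (t.2.1, t.2.2) := by
  have gen : ∀ (ls : List String) (d : PySem.Dict Int (List (Int × Int))),
      q ∈ (ls.foldl (fun d s => (slotSched.getD s []).foldl
            (fun d t => d.insert t.1 ((d.getD t.1 []) ++ [(t.2.1, t.2.2)])) d) d).getD day []
        ↔ q ∈ d.getD day [] ∨ ∃ s ∈ ls, ∃ t ∈ slotSched.getD s [], t.1 = day ∧ q = (t.2.1, t.2.2) := by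
    intro ls
    induction ls with
    | nil => simp
    | cons s ls ih =>
      intro d
      simp only [List.foldl_cons, ih, foldl_insert_append_mem, List.mem_cons]
      constructor
      · rintro ((hq | ht) | ⟨s', hs', hp⟩)
        · exact Or.inl hq
        · exact Or.inr ⟨s, Or.inl rfl, ht⟩
        · exact Or.inr ⟨s', Or.inr hs', hp⟩
      · rintro (hq | ⟨s', hs', hp⟩)
        · exact Or.inl (Or.inl hq)
        · rcases hs' with rfl | hs'
          · exact Or.inl (Or.inr hp)
          · exact Or.inr ⟨s', hs', hp⟩
  unfold busyIndex
  rw [gen]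
  simp only [PySem.Dict.getD_empty, List.not_mem_nil, false_or]
  constructor
  · rintro ⟨s, hs, hp⟩
    exact ⟨s, (PySem.Set.mem_ofList _ _).1 hs, hp⟩
  · rintro ⟨s, hs, hp⟩
    exact ⟨s, (PySem.Set.mem_ofList _ _).2 hs, hp⟩

lemma is_slot_conflict_iff (slots1 slots2 : List String) :
    is_slot_conflict slots1 slots2 = true
      ↔ ∃ s1 ∈ slots1, ∃ s2 ∈ slots2,
          s1 = s2 ∨ ∃ p1 ∈ slotTimings.getD s1 [], ∃ p2 ∈ slotTimings.getD s2 [],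
            p1.1 = p2.1 ∧
            max (rangeMinutes p1.2).1 (rangeMinutes p2.2).1 <
            min (rangeMinutes p1.2).2 (rangeMinutes p2.2).2 := by
  simp only [is_slot_conflict, isTimeConflict, List.any_eq_true, Bool.or_eq_true,
    Bool.and_eq_true, beq_iff_eq, decide_eq_true_eq]

lemma is_slot_conflict_alt_iff (slots1 slots2 : List String) :
    is_slot_conflict_alt slots1 slots2 = true
      ↔ (∃ s1 ∈ slots1, s1 ∈ slots2)
        ∨ ∃ s1 ∈ slots1, ∃ t ∈ slotSched.getD s1 [],
            ∃ s2 ∈ slots2, ∃ t2 ∈ slotSched.getD s2 [], t2.1 = t.1 ∧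
              max t.2.1 t2.2.1 < min t.2.2 t2.2.2 := by
  unfold is_slot_conflict_alt
  dsimp only
  split_ifs with h
  · refine iff_of_true rfl (Or.inl ?_)
    simpa only [List.any_eq_true, PySem.Set.contains, List.contains_eq_mem,
      PySem.Set.mem_ofList, decide_eq_true_eq] using h
  · simp only [List.any_eq_true] at h
    rw [List.any_eq_true]
    constructor
    · rintro ⟨s1, hs1, hinner⟩
      rw [PySem.Set.mem_ofList] at hs1
      simp only [List.any_eq_true, decide_eq_true_eq] at hinner
      obtain ⟨t, ht, q, hq, hlt⟩ := hinner
      rw [busyIndex_mem] at hq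
      obtain ⟨s2, hs2, t2, ht2, hday, rfl⟩ := hq
      exact Or.inr ⟨s1, hs1, t, ht, s2, hs2, t2, ht2, hday, hlt⟩
    · rintro (⟨s1, hs1, hs1'⟩ | ⟨s1, hs1, t, ht, s2, hs2, t2, ht2, hday, hlt⟩)
      · exact absurd ⟨s1, hs1, by simpa only [PySem.Set.contains, List.contains_eq_mem,
          PySem.Set.mem_ofList, decide_eq_true_eq]⟩ h
      · refine ⟨s1, (PySem.Set.mem_ofList _ _).2 hs1, ?_⟩
        simp only [List.any_eq_true, decide_eq_true_eq]
        refine ⟨t, ht, (t2.2.1, t2.2.2), ?_, hlt⟩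
        rw [busyIndex_mem]
        exact ⟨s2, hs2, t2, ht2, hday, rfl⟩

-- ===== VERDICT (by name: the statement is the Claim_ definition above) =====
theorem is_slot_conflict_spec : Claim_equal_is_slot_conflict := by
  intro slots1 slots2 _
  unfold Spec_is_slot_conflict
  rw [Bool.eq_iff_iff, is_slot_conflict_iff, is_slot_conflict_alt_iff]
  simp only [sched_getD, List.mem_map]
  constructor
  · rintro ⟨s1, hs1, s2, hs2, rfl | ⟨p1, hp1, p2, hp2, hday, hlt⟩⟩
    · exact Or.inl ⟨s1, hs1, hs2⟩
    · refine Or.inr ⟨s1, hs1, pvConv p1, ⟨p1, hp1, rfl⟩, s2, hs2, pvConv p2, ⟨p2, hp2, rfl⟩, ?_, hlt⟩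
      simp [pvConv, hday]
  · rintro (⟨s1, hs1, hs1'⟩ | ⟨s1, hs1, t, ⟨p1, hp1, rfl⟩, s2, hs2, t2, ⟨p2, hp2, rfl⟩, hday, hlt⟩)
    · exact ⟨s1, hs1, s1, hs1', Or.inl rfl⟩
    · refine ⟨s1, hs1, s2, hs2, Or.inr ⟨p1, hp1, p2, hp2, ?_, hlt⟩⟩
      exact code_inj p1.1 (day_mem s1 p1 hp1) p2.1 (day_mem s2 p2 hp2) (by
        simpa [pvConv] using hday.symm)
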